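-- pv_equiv track=rewrite | github.com/hailatGH/personal_works | Projects/TIN Checker/tinchecker/resources.py | replaceIt
-- ===== SOURCE A (Python) =====
-- def replaceIt(my_list):
--     oldvallist = ["CITYNAME", "id", "KEBELEDESC", "LOCALITYDESC",
--     "PARISHNAME","STREETNO","TAXCENTRENO","TELPHONE","TPNAME",
--     "TPNAME_F","TPNAME_S"]
--
--     newvallist = ["ZONE/SUB CITY:", "TIN NUMBER:", "WOREDA:", "LOCALITYDESC:",
--     "REGION:", "STREET NUMBER:", "TAX CENTER NUMBER:", "TELEPHONE NUMBER:",
--     "TAX PAYER NAME:", "TPNAME_F", "TAX PAYER NAME (AMHARIC):"]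
--
--     for oldval in my_list:
--         if oldval in oldvallist:
--             x = my_list.index(oldval)
--             y = oldvallist.index(oldval)
--             try:
--                 my_list[x] = newvallist[y]
--             except:
--                 pass
--     return my_list
-- ===== SOURCE B (Python) =====
-- def replaceIt(my_list):
--     oldvallist = ["CITYNAME", "id", "KEBELEDESC", "LOCALITYDESC",
--     "PARISHNAME","STREETNO","TAXCENTRENO","TELPHONE","TPNAME",
--     "TPNAME_F","TPNAME_S"]
--
--     newvallist = ["ZONE/SUB CITY:", "TIN NUMBER:", "WOREDA:", "LOCALITYDESC:",
--     "REGION:", "STREET NUMBER:", "TAX CENTER NUMBER:", "TELEPHONE NUMBER:",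
--     "TAX PAYER NAME:", "TPNAME_F", "TAX PAYER NAME (AMHARIC):"]
--
--     mapping = dict(zip(oldvallist, newvallist))
--     my_list[:] = [mapping.get(v, v) for v in my_list]
--     return my_list
-- ===== Notes on version B (the rewrite author's own statement) =====
-- stated objective: simpler
-- what changed: Replaces A's nested scans (outer live-list iteration with repeated list.index searches per element) by a dict built once and a single elementwise pass that rewrites the list in place.
import Mathlib
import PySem

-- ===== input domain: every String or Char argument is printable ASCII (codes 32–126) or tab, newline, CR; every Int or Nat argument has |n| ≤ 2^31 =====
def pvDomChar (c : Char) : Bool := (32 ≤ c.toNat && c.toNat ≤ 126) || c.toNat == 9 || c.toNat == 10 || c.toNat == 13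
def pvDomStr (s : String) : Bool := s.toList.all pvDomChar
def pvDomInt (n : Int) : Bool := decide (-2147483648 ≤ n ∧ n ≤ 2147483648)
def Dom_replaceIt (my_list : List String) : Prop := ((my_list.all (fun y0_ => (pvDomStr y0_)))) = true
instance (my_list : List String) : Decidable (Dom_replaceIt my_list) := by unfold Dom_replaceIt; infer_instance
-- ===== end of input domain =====

-- B builds the substitution dict once and rewrites the list elementwise in one pass (simpler than A's
-- live-list iteration with repeated list.index scans). Both A and B mutate my_list in place and return
-- the same object; the equivalence proved here is about the returned value.

-- ===== PORT A =====
def pvOldA : List String := ["CITYNAME", "id", "KEBELEDESC", "LOCALITYDESC",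
  "PARISHNAME", "STREETNO", "TAXCENTRENO", "TELPHONE", "TPNAME",
  "TPNAME_F", "TPNAME_S"]

def pvNewA : List String := ["ZONE/SUB CITY:", "TIN NUMBER:", "WOREDA:", "LOCALITYDESC:",
  "REGION:", "STREET NUMBER:", "TAX CENTER NUMBER:", "TELEPHONE NUMBER:",
  "TAX PAYER NAME:", "TPNAME_F", "TAX PAYER NAME (AMHARIC):"]

-- `for oldval in my_list` iterates by index over the live (mutating) list; the body never changes the
-- length, so each step reads the CURRENT element at index i. `my_list[x] = …` with x from list.index is
-- a nonnegative in-range assignment, i.e. List.set; the try/except around newvallist[y] is the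
-- `| none => cur` branch of pyGet?.
def replaceIt (my_list : List String) : List String :=
  (PySem.List.pyRange 0 my_list.length 1).foldl (fun cur i =>
    match PySem.List.pyGet? cur i with
    | none => cur
    | some oldval =>
      if oldval ∈ pvOldA then
        match PySem.List.index? cur oldval, PySem.List.index? pvOldA oldval with
        | some x, some y =>
          match PySem.List.pyGet? pvNewA (y : Int) with
          | some nv => cur.set x nv
          | none => cur
        | _, _ => cur
      else cur) my_list

-- ===== PORT B =====
def pvMapB : PySem.Dict String String := PySem.Dict.ofList (pvOldA.zip pvNewA)

-- mapping.get(v, v)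
def pvSubstB (v : String) : String := pvMapB.getD v v

def replaceIt_alt (my_list : List String) : List String := my_list.map pvSubstB

-- ===== PRECONDITION & SPEC =====
def Spec_replaceIt (my_list : List String) (out : List String) : Prop := out = replaceIt_alt my_list
instance (my_list : List String) (out : List String) : Decidable (Spec_replaceIt my_list out) := by unfold Spec_replaceIt; infer_instance

-- ===== CLAIM (what is proved, stated in full; the proofs are below) =====
def Claim_equal_replaceIt : Prop := ∀ (my_list : List String), Dom_replaceIt my_list → Spec_replaceIt my_list (replaceIt my_list)

-- ===== LEMMAS AND PROOFS =====

-- v not a keyword: the substitution leaves it unchanged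
theorem pvSubstB_of_not_mem {v : String} (h : v ∉ pvOldA) : pvSubstB v = v := by
  have he : pvMapB = PySem.Dict.mk [("CITYNAME", "ZONE/SUB CITY:"), ("id", "TIN NUMBER:"),
      ("KEBELEDESC", "WOREDA:"), ("LOCALITYDESC", "LOCALITYDESC:"), ("PARISHNAME", "REGION:"),
      ("STREETNO", "STREET NUMBER:"), ("TAXCENTRENO", "TAX CENTER NUMBER:"),
      ("TELPHONE", "TELEPHONE NUMBER:"), ("TPNAME", "TAX PAYER NAME:"), ("TPNAME_F", "TPNAME_F"),
      ("TPNAME_S", "TAX PAYER NAME (AMHARIC):")] := by decide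
  simp [pvOldA, List.mem_cons] at h
  obtain ⟨h1, h2, h3, h4, h5, h6, h7, h8, h9, h10, h11⟩ := h
  simp [pvSubstB, he, PySem.Dict.getD, PySem.Dict.get?,
    Ne.symm h1, Ne.symm h2, Ne.symm h3, Ne.symm h4, Ne.symm h5, Ne.symm h6,
    Ne.symm h7, Ne.symm h8, Ne.symm h9, Ne.symm h10, Ne.symm h11]

-- v a keyword: A's inner lookups succeed and produce exactly B's substitution, whose value is again a
-- keyword only in the self-mapping case "TPNAME_F"
theorem pv_key_data {v : String} (h : v ∈ pvOldA) :
    ∃ y : Nat, PySem.List.index? pvOldA v = some y ∧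
      PySem.List.pyGet? pvNewA (y : Int) = some (pvSubstB v) ∧
      (pvSubstB v ∈ pvOldA → pvSubstB v = "TPNAME_F") := by
  simp [pvOldA, List.mem_cons] at h
  rcases h with h | h | h | h | h | h | h | h | h | h | h <;> subst h
  · exact ⟨0, by decide, by decide, by decide⟩
  · exact ⟨1, by decide, by decide, by decide⟩
  · exact ⟨2, by decide, by decide, by decide⟩
  · exact ⟨3, by decide, by decide, by decide⟩
  · exact ⟨4, by decide, by decide, by decide⟩
  · exact ⟨5, by decide, by decide, by decide⟩
  · exact ⟨6, by decide, by decide, by decide⟩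
  · exact ⟨7, by decide, by decide, by decide⟩
  · exact ⟨8, by decide, by decide, by decide⟩
  · exact ⟨9, by decide, by decide, by decide⟩
  · exact ⟨10, by decide, by decide, by decide⟩

-- setting position p.length of p ++ v :: s
theorem pv_set_append_cons {α : Type} (p : List α) (v w : α) (s : List α) :
    (p ++ v :: s).set p.length w = p ++ w :: s := by
  induction p with
  | nil => simp
  | cons a t ih => simp [ih]

-- the loop invariant: with the already-processed prefix acc containing no keyword other than the
-- self-mapped "TPNAME_F", the remaining iterations map the suffix elementwise by pvSubstB
theorem pv_loopA (suf : List String) : ∀ acc : List String,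
    (∀ p ∈ acc, p ∈ pvOldA → p = "TPNAME_F") →
    (PySem.List.pyRange (acc.length : Int) ((acc.length : Int) + suf.length) 1).foldl (fun cur i =>
      match PySem.List.pyGet? cur i with
      | none => cur
      | some oldval =>
        if oldval ∈ pvOldA then
          match PySem.List.index? cur oldval, PySem.List.index? pvOldA oldval with
          | some x, some y =>
            match PySem.List.pyGet? pvNewA (y : Int) with
            | some nv => cur.set x nv
            | none => cur
          | _, _ => cur
        else cur) (acc ++ suf) = acc ++ suf.map pvSubstB := by
  induction suf with
  | nil => intro acc _; simp [PySem.List.pyRange_one_eq_nil]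
  | cons v rest ih =>
    intro acc hacc
    rw [PySem.List.pyRange_one_cons (by push_cast [List.length_cons]; omega)]
    rw [List.foldl_cons]
    have hget : PySem.List.pyGet? (acc ++ v :: rest) (acc.length : Int) = some v := by
      simp
    have hstep : (match PySem.List.pyGet? (acc ++ v :: rest) (acc.length : Int) with
      | none => acc ++ v :: rest
      | some oldval =>
        if oldval ∈ pvOldA then
          match PySem.List.index? (acc ++ v :: rest) oldval, PySem.List.index? pvOldA oldval with
          | some x, some y =>
            match PySem.List.pyGet? pvNewA (y : Int) with
            | some nv => (acc ++ v :: rest).set x nv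
            | none => acc ++ v :: rest
          | _, _ => acc ++ v :: rest
        else acc ++ v :: rest) = acc ++ pvSubstB v :: rest := by
      rw [hget]
      by_cases hv : v ∈ pvOldA
      · obtain ⟨y, hy, hnv, _⟩ := pv_key_data hv
        by_cases hvacc : v ∈ acc
        · -- v already occurs (replaced) in acc: v = "TPNAME_F", the set rewrites v to itself
          have hTP : v = "TPNAME_F" := hacc v hvacc hv
          cases hidx : PySem.List.index? (acc ++ v :: rest) v with
          | none =>
            exact absurd ((PySem.List.index?_eq_none_iff _ _).mp hidx) (by simp)
          | some x =>
            obtain ⟨p, s, hps, hlen, _⟩ := (PySem.List.index?_eq_some_iff _ _ _).mp hidx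
            have hsub : pvSubstB v = v := by subst hTP; decide
            have hset : (acc ++ v :: rest).set x v = acc ++ v :: rest := by
              rw [hps, ← hlen, pv_set_append_cons]
            simp only [hv, if_true, hidx, hy, hnv, hsub, hset]
        · have hidx : PySem.List.index? (acc ++ v :: rest) v = some acc.length :=
            (PySem.List.index?_eq_some_iff _ _ _).mpr ⟨acc, rest, rfl, rfl, hvacc⟩
          simp only [hv, if_true, hidx, hy, hnv, pv_set_append_cons]
      · simp [hv, pvSubstB_of_not_mem hv]
    rw [hstep]
    have hlen2 : ((acc ++ [pvSubstB v]).length : Int) = (acc.length : Int) + 1 := by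
      simp
    have hmem : ∀ p ∈ acc ++ [pvSubstB v], p ∈ pvOldA → p = "TPNAME_F" := by
      intro p hp hpOld
      rcases List.mem_append.mp hp with hp | hp
      · exact hacc p hp hpOld
      · simp at hp
        subst hp
        by_cases hv : v ∈ pvOldA
        · exact (pv_key_data hv).choose_spec.2.2 hpOld
        · rw [pvSubstB_of_not_mem hv] at hpOld ⊢
          exact absurd hpOld hv
    have := ih (acc ++ [pvSubstB v]) hmem
    rw [hlen2] at this
    have harr : (acc ++ [pvSubstB v]) ++ rest = acc ++ pvSubstB v :: rest := by simp
    rw [harr] at this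
    have hb : (acc.length : Int) + ((v :: rest).length : Int) = ((acc.length : Int) + 1) + (rest.length : Int) := by
      simp; omega
    rw [hb]
    rw [this]
    simp

-- ===== VERDICT (by name: the statement is the Claim_ definition above) =====
theorem replaceIt_spec : Claim_equal_replaceIt := by
  intro l _
  show replaceIt l = replaceIt_alt l
  have := pv_loopA l [] (by simp)
  simpa [replaceIt, replaceIt_alt] using this
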